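-- pv_equiv track=rewrite | github.com/Gg50LaG/app-bfhl-api | main.py | alternating_caps
-- ===== SOURCE A (Python) =====
-- def alternating_caps(s):
--     result = ""
--     upper = True
--     for char in s:
--         if char.isalpha():
--             result += char.upper() if upper else char.lower()
--             upper = not upper
--         else:
--             result += char
--     return result
-- ===== SOURCE B (Python) =====
-- def alternating_caps(s):
--     alphas = [c for c in s if c.isalpha()]
--     cased = [c.upper() if i % 2 == 0 else c.lower() for i, c in enumerate(alphas)]
--     it = iter(cased)
--     return ''.join(next(it) if c.isalpha() else c for c in s)
-- ===== Notes on version B (the rewrite author's own statement) =====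
-- stated objective: alternative
-- what changed: Replaces the single stateful toggle loop by an extract-then-merge pair of passes: the alphabetic characters are pulled out, cased by their own index parity via enumerate, and merged back into the original string through an iterator.
import Mathlib
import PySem

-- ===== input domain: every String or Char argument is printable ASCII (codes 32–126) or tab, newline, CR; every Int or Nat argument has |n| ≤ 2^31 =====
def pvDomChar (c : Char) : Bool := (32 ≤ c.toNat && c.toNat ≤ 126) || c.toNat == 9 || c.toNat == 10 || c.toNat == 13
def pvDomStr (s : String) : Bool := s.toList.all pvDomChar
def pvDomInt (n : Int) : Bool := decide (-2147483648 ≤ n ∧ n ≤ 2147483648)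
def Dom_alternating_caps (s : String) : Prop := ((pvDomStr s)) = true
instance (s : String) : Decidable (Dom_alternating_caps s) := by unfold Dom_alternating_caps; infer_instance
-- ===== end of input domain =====

-- B replaces A's single stateful toggle loop by an extract/case-by-parity/merge-back pair of passes (objective: alternative).


-- ===== PORT A =====
-- stateful toggle loop: result string plus an 'upper' flag, updated char by char
def alternating_caps (s : String) : String :=
  (s.toList.foldl (fun (st : String × Bool) c =>
    if PySem.Chars.isalpha c then
      (st.1.push (if st.2 then PySem.Chars.upperChar c else PySem.Chars.lowerChar c), !st.2)
    else (st.1.push c, st.2)) ("", true)).1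

-- ===== PORT B =====
-- merge pass: consume the original chars, drawing the next pre-cased char for each alphabetic one
-- (the empty-iterator branch is unreachable: 'cased' has one char per alphabetic char of s)
def pvMerge : List Char → List Char → List Char
  | [], _ => []
  | c :: rest, cs =>
    if PySem.Chars.isalpha c then
      match cs with
      | d :: ds => d :: pvMerge rest ds
      | [] => []
    else c :: pvMerge rest cs

def alternating_caps_alt (s : String) : String :=
  let alphas := s.toList.filter (fun c => PySem.Chars.isalpha c)
  let cased := (PySem.List.enumerate alphas).map
    (fun p => if p.1 % 2 == 0 then PySem.Chars.upperChar p.2 else PySem.Chars.lowerChar p.2)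
  String.ofList (pvMerge s.toList cased)

-- ===== PRECONDITION & SPEC =====
def Spec_alternating_caps (s : String) (out : String) : Prop := out = alternating_caps_alt s
instance (s : String) (out : String) : Decidable (Spec_alternating_caps s out) := by unfold Spec_alternating_caps; infer_instance

-- ===== CLAIM (what is proved, stated in full; the proofs are below) =====
def Claim_equal_alternating_caps : Prop := ∀ (s : String), Dom_alternating_caps s → Spec_alternating_caps s (alternating_caps s)

-- ===== LEMMAS AND PROOFS =====

-- common intermediate: the alternating-cased character list, with the toggle as parameter
def altChars : Bool → List Char → List Char
  | _, [] => []
  | b, c :: rest =>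
    if PySem.Chars.isalpha c then
      (if b then PySem.Chars.upperChar c else PySem.Chars.lowerChar c) :: altChars (!b) rest
    else c :: altChars b rest

-- A's fold accumulates exactly res ++ altChars b l
theorem foldA_eq (l : List Char) : ∀ (res : String) (b : Bool),
    (l.foldl (fun (st : String × Bool) c =>
      if PySem.Chars.isalpha c then
        (st.1.push (if st.2 then PySem.Chars.upperChar c else PySem.Chars.lowerChar c), !st.2)
      else (st.1.push c, st.2)) (res, b)).1.toList = res.toList ++ altChars b l := by
  induction l with
  | nil => intro res b; simp [altChars]
  | cons c rest ih =>
    intro res b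
    by_cases h : PySem.Chars.isalpha c = true
    · simp only [List.foldl_cons, h, if_pos, altChars]
      rw [ih]
      simp
    · simp only [List.foldl_cons, altChars, h, if_neg, Bool.false_eq_true, not_false_iff]
      rw [ih]
      simp

-- B's merge of the parity-cased alpha subsequence is altChars with the parity toggle
theorem merge_eq (l : List Char) : ∀ (k : Int),
    pvMerge l ((PySem.List.enumerate (l.filter (fun c => PySem.Chars.isalpha c)) k).map
      (fun p => if p.1 % 2 == 0 then PySem.Chars.upperChar p.2 else PySem.Chars.lowerChar p.2))
      = altChars (k % 2 == 0) l := by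
  induction l with
  | nil => intro k; simp [pvMerge, altChars]
  | cons c rest ih =>
    intro k
    by_cases h : PySem.Chars.isalpha c = true
    · simp only [List.filter_cons, h, if_pos, PySem.List.enumerate_cons, List.map_cons,
        pvMerge, altChars]
      rw [ih (k + 1)]
      have hpar : (((k + 1) % 2 == 0) = !(k % 2 == 0)) := by
        rcases Int.emod_two_eq_zero_or_one k with h2 | h2
        · have h3 : (k + 1) % 2 = 1 := by omega
          simp [h2, h3]
        · have h3 : (k + 1) % 2 = 0 := by omega
          simp [h2, h3]
      rw [hpar]
    · simp only [List.filter_cons, h, Bool.false_eq_true, if_neg, not_false_iff, pvMerge,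
        altChars]
      rw [ih k]

-- ===== VERDICT (by name: the statement is the Claim_ definition above) =====
theorem alternating_caps_spec : Claim_equal_alternating_caps := by
  intro s _
  unfold Spec_alternating_caps alternating_caps alternating_caps_alt
  have hb := merge_eq s.toList 0
  simp only [show ((0 : Int) % 2 == 0) = true from rfl] at hb
  have ha := foldA_eq s.toList "" true
  simp only []
  rw [hb]
  apply String.toList_injective
  rw [ha]
  simp [String.toList_ofList]
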